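-- pv_equiv track=rewrite | github.com/whosayn/wordleguesser | frontend/views.py | _process_absent_letters
-- ===== SOURCE A (Python) =====
-- def _process_absent_letters(words, absent_letters):
--     if not absent_letters:
--         return words
--
--     result = words
--     for letter in absent_letters:
--         current_words = []
--         for word in result:
--             if letter not in word:
--                 current_words.append(word)
--         result = current_words
--     return result
-- ===== SOURCE B (Python) =====
-- def _process_absent_letters(words, absent_letters):
--     return [w for w in words if not any(l in w for l in absent_letters)]
-- ===== Notes on version B (the rewrite author's own statement) =====
-- stated objective: simpler
-- what changed: Replaces the per-letter repeated rebuild of the word list (one filtering pass per absent letter) with a single comprehension keeping words containing none of the letters.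
import Mathlib
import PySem

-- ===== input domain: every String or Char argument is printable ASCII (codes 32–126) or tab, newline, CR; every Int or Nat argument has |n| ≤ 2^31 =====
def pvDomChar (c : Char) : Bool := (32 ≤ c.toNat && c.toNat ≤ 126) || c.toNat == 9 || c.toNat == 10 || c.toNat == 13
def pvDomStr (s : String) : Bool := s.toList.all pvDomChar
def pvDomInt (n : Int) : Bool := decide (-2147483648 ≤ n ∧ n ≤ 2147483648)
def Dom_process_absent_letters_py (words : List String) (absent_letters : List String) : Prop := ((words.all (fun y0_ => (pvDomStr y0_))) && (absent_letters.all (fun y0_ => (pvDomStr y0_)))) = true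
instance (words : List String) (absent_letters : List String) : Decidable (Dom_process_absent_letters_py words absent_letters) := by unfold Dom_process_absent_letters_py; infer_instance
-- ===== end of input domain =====

-- B is a single filter pass keeping words containing none of the absent letters; A rebuilds the list once per letter.

-- ===== PORT A =====
def process_absent_letters_py (words : List String) (absent_letters : List String) : List String :=
  if absent_letters.isEmpty then words
  else
    absent_letters.foldl
      (fun result letter =>
        result.foldl
          (fun current_words word =>
            if !(PySem.Str.isIn letter word) then current_words ++ [word] else current_words)
          [])
      words

-- ===== PORT B =====
def process_absent_letters_py_alt (words : List String) (absent_letters : List String) : List String :=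
  words.filter (fun w => !(absent_letters.any (fun l => PySem.Str.isIn l w)))

-- ===== PRECONDITION & SPEC =====
def Spec_process_absent_letters_py (words : List String) (absent_letters : List String) (out : List String) : Prop := out = process_absent_letters_py_alt words absent_letters
instance (words : List String) (absent_letters : List String) (out : List String) : Decidable (Spec_process_absent_letters_py words absent_letters out) := by unfold Spec_process_absent_letters_py; infer_instance

-- ===== CLAIM (what is proved, stated in full; the proofs are below) =====
def Claim_equal_process_absent_letters_py : Prop := ∀ (words : List String) (absent_letters : List String), Dom_process_absent_letters_py words absent_letters → Spec_process_absent_letters_py words absent_letters (process_absent_letters_py words absent_letters)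

-- ===== LEMMAS AND PROOFS =====

-- A's inner loop (generic predicate) is a filter.
theorem pv_inner_filter (p : String → Bool) (ws : List String) (acc : List String) :
    ws.foldl (fun current_words word => if !(p word) then current_words ++ [word] else current_words) acc
      = acc ++ ws.filter (fun w => !(p w)) := by
  induction ws generalizing acc with
  | nil => simp
  | cons w ws ih =>
    rw [List.foldl_cons, ih, List.filter_cons]
    by_cases hw : p w = true
    · simp [hw]
    · simp [hw, List.append_assoc]

-- Sequential filtering by each letter equals one filter by the disjunction.
theorem pv_fold_filter (f : String → String → Bool) (ls : List String) (ws : List String) :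
    ls.foldl (fun result letter =>
        result.foldl
          (fun current_words word => if !(f letter word) then current_words ++ [word] else current_words)
          []) ws
      = ws.filter (fun w => !(ls.any (fun l => f l w))) := by
  induction ls generalizing ws with
  | nil => simp
  | cons l ls ih =>
    rw [List.foldl_cons, pv_inner_filter, List.nil_append, ih, List.filter_filter]
    apply List.filter_congr
    intro w _
    by_cases h : f l w = true <;> simp [h]

-- ===== VERDICT (by name: the statement is the Claim_ definition above) =====
theorem process_absent_letters_py_spec : Claim_equal_process_absent_letters_py := by
  intro words absent_letters _
  unfold Spec_process_absent_letters_py process_absent_letters_py process_absent_letters_py_alt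
  by_cases h : absent_letters.isEmpty
  · rw [if_pos h, List.isEmpty_iff.mp h]
    simp
  · rw [if_neg h, pv_fold_filter (fun l w => PySem.Str.isIn l w)]
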